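-- pv_equiv track=rewrite | github.com/anon381/leetcode | 717. 1-bit and 2-bit Characters.py | isOneBitCharacter
-- ===== SOURCE A (Python) =====
-- def isOneBitCharacter(bits: list[int]) -> bool:
--     idx = 0
--     n = len(bits)
--     while idx < n - 1:
--         if bits[idx] == 1:
--             idx += 2
--         else:
--             idx += 1
--     return idx == n - 1
-- ===== SOURCE B (Python) =====
-- def isOneBitCharacter(bits: list[int]) -> bool:
--     if not bits:
--         return False
--     count = 0
--     i = len(bits) - 2
--     while i >= 0 and bits[i] == 1:
--         count += 1
--         i -= 1
--     return count % 2 == 0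
-- ===== Notes on version B (the rewrite author's own statement) =====
-- stated objective: faster
-- what changed: Replaces the forward greedy 1/2-step parse of the whole list with a single backward scan that counts the trailing run of ones before the last element and returns whether that count is even.
import Mathlib
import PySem

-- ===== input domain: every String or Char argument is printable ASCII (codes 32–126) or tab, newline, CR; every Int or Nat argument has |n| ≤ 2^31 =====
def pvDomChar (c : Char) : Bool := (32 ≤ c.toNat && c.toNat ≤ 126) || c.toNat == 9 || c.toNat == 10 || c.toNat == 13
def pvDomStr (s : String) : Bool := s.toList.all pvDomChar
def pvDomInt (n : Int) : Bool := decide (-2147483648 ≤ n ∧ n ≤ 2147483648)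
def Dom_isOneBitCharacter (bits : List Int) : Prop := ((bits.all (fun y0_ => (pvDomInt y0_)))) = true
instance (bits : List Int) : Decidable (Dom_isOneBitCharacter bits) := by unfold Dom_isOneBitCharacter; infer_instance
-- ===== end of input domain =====

-- B replaces A's forward greedy 1/2-step parse by a backward scan counting the
-- trailing run of ones before the last element (even count ⇒ True); a timing run measured B faster.

-- ===== PORT A =====
-- while idx < n - 1: step 2 on a 1, else step 1; returns the final idx.
def isOBCLoop (bits : List Int) (n idx : Nat) : Nat :=
  if (idx : Int) < (n : Int) - 1 then
    if bits.getD idx 0 = 1 then isOBCLoop bits n (idx + 2)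
    else isOBCLoop bits n (idx + 1)
  else idx
termination_by n - idx
decreasing_by all_goals omega

def isOneBitCharacter (bits : List Int) : Bool :=
  let n := bits.length
  decide ((isOBCLoop bits n 0 : Int) = (n : Int) - 1)

-- ===== PORT B =====
-- while i >= 0 and bits[i] == 1: count += 1; i -= 1   (i is always in range when read)
def isOBCAltLoop (bits : List Int) (i : Int) (count : Nat) : Nat :=
  if 0 ≤ i ∧ PySem.List.pyGetD bits i 0 = 1 then isOBCAltLoop bits (i - 1) (count + 1)
  else count
termination_by (i + 1).toNat
decreasing_by omega

def isOneBitCharacter_alt (bits : List Int) : Bool :=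
  if bits = [] then false
  else decide (isOBCAltLoop bits ((bits.length : Int) - 2) 0 % 2 = 0)

-- ===== PRECONDITION & SPEC =====
def Spec_isOneBitCharacter (bits : List Int) (out : Bool) : Prop := out = isOneBitCharacter_alt bits
instance (bits : List Int) (out : Bool) : Decidable (Spec_isOneBitCharacter bits out) := by unfold Spec_isOneBitCharacter; infer_instance

-- ===== CLAIM (what is proved, stated in full; the proofs are below) =====
def Claim_equal_isOneBitCharacter : Prop := ∀ (bits : List Int), Dom_isOneBitCharacter bits → Spec_isOneBitCharacter bits (isOneBitCharacter bits)

-- ===== LEMMAS AND PROOFS =====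

-- structural version of A's greedy parse
def pvF : List Int → Bool
  | [] => false
  | [_] => true
  | c :: x :: rest => if c = 1 then pvF rest else pvF (x :: rest)

theorem pvF_cons2 (c x : Int) (rest : List Int) :
    pvF (c :: x :: rest) = if c = 1 then pvF rest else pvF (x :: rest) := rfl

-- length of the trailing run of ones, defined from the front
def pvTrail : List Int → Nat
  | [] => 0
  | c :: ys => if c = 1 ∧ ys.all (· = 1) then ys.length + 1 else pvTrail ys

theorem pvTrail_allOnes (ys : List Int) (h : ys.all (· = 1) = true) :
    pvTrail ys = ys.length := by
  induction ys with
  | nil => rfl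
  | cons c ys ih =>
    simp only [List.all_cons, Bool.and_eq_true, decide_eq_true_eq] at h
    simp [pvTrail, h.1, h.2]

theorem pvTrail_append (xs : List Int) (c : Int) :
    pvTrail (xs ++ [c]) = if c = 1 then pvTrail xs + 1 else 0 := by
  induction xs with
  | nil => by_cases h : c = 1 <;> simp [pvTrail, h]
  | cons x xs ih =>
    rw [List.cons_append, pvTrail]
    by_cases hc : c = 1
    · by_cases hx : x = 1 ∧ xs.all (· = 1) = true
      · rw [if_pos ⟨hx.1, by simp [List.all_append, hx.2, hc]⟩, if_pos hc, pvTrail,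
          if_pos hx]
        simp
      · have hno : ¬ (x = 1 ∧ (xs ++ [c]).all (· = 1) = true) := by
          intro ⟨h1, h2⟩
          simp only [List.all_append, Bool.and_eq_true] at h2
          exact hx ⟨h1, h2.1⟩
        rw [if_neg hno, ih, if_pos hc, if_pos hc, pvTrail, if_neg hx]
    · have hno : ¬ (x = 1 ∧ (xs ++ [c]).all (· = 1) = true) := by
        intro ⟨_, h2⟩
        simp [List.all_append, hc] at h2
      rw [if_neg hno, ih, if_neg hc, if_neg hc]

theorem pvTrail_cons2_parity (x : Int) (ys : List Int) :
    pvTrail ((1 : Int) :: x :: ys) % 2 = pvTrail ys % 2 := by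
  by_cases h : (x :: ys).all (· = 1) = true
  · have h' := h
    simp only [List.all_cons, Bool.and_eq_true, decide_eq_true_eq] at h'
    rw [pvTrail, if_pos ⟨rfl, h⟩, pvTrail_allOnes ys h'.2]
    simp
    omega
  · have hx : ¬ (x = 1 ∧ ys.all (· = 1) = true) := by
      intro ⟨h1, h2⟩; exact h (by simp [List.all_cons, h1, h2])
    rw [pvTrail, if_neg (by intro ⟨_, h2⟩; exact h h2), pvTrail, if_neg hx]

-- A's loop computes pvF of the unread suffix
theorem loopA_eq (bits : List Int) :
    ∀ k idx, bits.length - idx ≤ k → idx ≤ bits.length →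
      decide ((isOBCLoop bits bits.length idx : Int) = (bits.length : Int) - 1)
        = pvF (bits.drop idx) := by
  intro k
  induction k with
  | zero =>
    intro idx hk hle
    have hidx : idx = bits.length := by omega
    subst hidx
    rw [isOBCLoop]
    rw [if_neg (by omega)]
    simp [pvF]
    omega
  | succ k ih =>
    intro idx hk hle
    rw [isOBCLoop]
    by_cases h : (idx : Int) < (bits.length : Int) - 1
    · rw [if_pos h]
      have h1 : idx + 1 < bits.length := by omega
      have h0 : idx < bits.length := by omega
      rw [List.drop_eq_getElem_cons h0, List.drop_eq_getElem_cons h1]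
      have hget : bits.getD idx 0 = bits[idx] := List.getD_eq_getElem bits 0 h0
      rw [pvF_cons2]
      by_cases hv : bits[idx] = 1
      · rw [if_pos (by rw [hget]; exact hv), if_pos hv]
        exact ih (idx + 2) (by omega) (by omega)
      · rw [if_neg (by rw [hget]; exact hv), if_neg hv]
        rw [ih (idx + 1) (by omega) (by omega), List.drop_eq_getElem_cons h1]
    · rw [if_neg h]
      by_cases hn : idx = bits.length
      · subst hn
        simp [pvF, List.drop_length]
        omega
      · have hlen : (bits.drop idx).length = 1 := by
          rw [List.length_drop]; omega
        obtain ⟨a, t, hdrop⟩ : ∃ a t, bits.drop idx = a :: t := by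
          cases hd : bits.drop idx with
          | nil => rw [hd] at hlen; simp at hlen
          | cons a t => exact ⟨a, t, rfl⟩
        have ht : t = [] := by
          rw [hdrop] at hlen; simpa using hlen
        rw [hdrop, ht]
        simp [pvF]
        omega

-- B's loop counts the trailing ones of the prefix bits[0..i]
theorem loopB_eq (bits : List Int) :
    ∀ k (i : Int) count, i < (bits.length : Int) → (i + 1).toNat ≤ k →
      isOBCAltLoop bits i count = count + pvTrail (bits.take (i + 1).toNat) := by
  intro k
  induction k with
  | zero =>
    intro i count hi hk
    rw [isOBCAltLoop, if_neg (by intro ⟨h0, _⟩; omega)]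
    have : (i + 1).toNat = 0 := by omega
    simp [this, pvTrail]
  | succ k ih =>
    intro i count hi hk
    rw [isOBCAltLoop]
    by_cases h0 : 0 ≤ i
    · have hlt : i.toNat < bits.length := by omega
      have hto : (i + 1).toNat = i.toNat + 1 := by omega
      have hget : PySem.List.pyGetD bits i 0 = bits[i.toNat] := by
        have := PySem.List.pyGetD_of_nonneg (xs := bits) (d := (0 : Int)) h0
        rw [this, List.getD_eq_getElem bits 0 hlt]
      have htake : bits.take (i + 1).toNat = bits.take i.toNat ++ [bits[i.toNat]] := by
        rw [hto, List.take_add_one, List.getElem?_eq_getElem hlt]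
        simp
      by_cases hv : bits[i.toNat] = 1
      · rw [if_pos ⟨h0, by rw [hget]; exact hv⟩]
        rw [ih (i - 1) (count + 1) (by omega) (by omega)]
        have : (i - 1 + 1).toNat = i.toNat := by omega
        rw [this, htake, pvTrail_append, if_pos hv]
        omega
      · rw [if_neg (by intro ⟨_, hc⟩; rw [hget] at hc; exact hv hc)]
        rw [htake, pvTrail_append, if_neg hv]
        omega
    · rw [if_neg (by intro ⟨hc, _⟩; exact h0 hc)]
      have : (i + 1).toNat = 0 := by omega
      simp [this, pvTrail]

-- B computes the parity of the trailing ones of bits.dropLast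
theorem alt_eq (bits : List Int) :
    isOneBitCharacter_alt bits
      = if bits = [] then false else decide (pvTrail bits.dropLast % 2 = 0) := by
  unfold isOneBitCharacter_alt
  by_cases h : bits = []
  · simp [h]
  · rw [if_neg h, if_neg h]
    have hn : 1 ≤ bits.length := by
      cases bits with
      | nil => exact absurd rfl h
      | cons a t => simp
    rw [loopB_eq bits (((bits.length : Int) - 2) + 1).toNat ((bits.length : Int) - 2) 0
        (by omega) (le_refl _)]
    have : ((bits.length : Int) - 2 + 1).toNat = bits.length - 1 := by omega
    rw [this, ← List.dropLast_eq_take]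
    simp

-- the greedy parse succeeds iff the trailing run of ones (before the last element) is even
theorem pvF_eq_parity (bits : List Int) :
    pvF bits = if bits = [] then false else decide (pvTrail bits.dropLast % 2 = 0) := by
  fun_induction pvF bits with
  | case1 => rfl
  | case2 x => simp [pvTrail]
  | case3 x rest ih =>
    cases rest with
    | nil => simp [pvF, pvTrail, List.dropLast]
    | cons r rs =>
      rw [ih, if_neg (by simp), if_neg (by simp)]
      have hdl : ((1 : Int) :: x :: r :: rs).dropLast = 1 :: x :: (r :: rs).dropLast := by
        simp
      rw [hdl, pvTrail_cons2_parity x (r :: rs).dropLast]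
  | case4 c x rest hc ih =>
    rw [ih, if_neg (by simp), if_neg (by simp)]
    have hdl : (c :: x :: rest).dropLast = c :: (x :: rest).dropLast := by
      simp
    have hx : ¬ (c = 1 ∧ ((x :: rest).dropLast).all (· = 1) = true) := by
      intro ⟨h1, _⟩; exact hc h1
    rw [hdl, pvTrail, if_neg hx]

-- ===== VERDICT (by name: the statement is the Claim_ definition above) =====
theorem isOneBitCharacter_spec : Claim_equal_isOneBitCharacter := by
  intro bits _
  unfold Spec_isOneBitCharacter
  rw [alt_eq, ← pvF_eq_parity]
  show decide ((isOBCLoop bits bits.length 0 : Int) = (bits.length : Int) - 1) = pvF bits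
  have h := loopA_eq bits bits.length 0 (by omega) (by omega)
  rwa [List.drop_zero] at h
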